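-- pv_equiv track=rewrite | github.com/joqjoq966/Algorithm_python | Codeforces/Round #694/C.py | solution
-- ===== SOURCE A (Python) =====
-- def solution(n,x,friends,presents):
-- 	friends.sort(reverse=True)
-- 	ans = 0; cnt=0
-- 	visited = [False]*n
-- 	for f in friends:
-- 		if cnt<f and visited[cnt]==False:
-- 			ans += presents[cnt]
-- 			visited[cnt] = True
-- 			cnt += 1
-- 		else:
-- 			ans+=presents[f-1]
-- 	return ans
-- ===== SOURCE B (Python) =====
-- def solution(n, x, friends, presents):
--     # t = size of the greedy "top" group: the largest k such that at least k
--     # friends have value >= k (an h-index), found by binary search + counting,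
--     # with no sorting at all.  (A sorts `friends` in place; B does not mutate it.)
--     lo, hi = 0, len(friends)
--     while lo < hi:
--         mid = (lo + hi + 1) // 2
--         if sum(1 for f in friends if f >= mid) >= mid:
--             lo = mid
--         else:
--             hi = mid - 1
--     t = lo
--     ans = sum(presents[i] for i in range(t))
--     if t == 0:
--         return ans + sum(presents[f - 1] for f in friends)
--     # v = value of the t-th largest friend: the largest w with >= t friends of value >= w
--     lo, hi = t, max(friends)
--     while lo < hi:
--         mid = (lo + hi + 1) // 2
--         if sum(1 for f in friends if f >= mid) >= t:
--             lo = mid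
--         else:
--             hi = mid - 1
--     v = lo
--     # friends strictly below v are all outside the top group; of the friends equal
--     # to v, exactly `copies` many are outside it
--     gt = sum(1 for f in friends if f > v)
--     copies = sum(1 for f in friends if f == v) - (t - gt)
--     ans += sum(presents[f - 1] for f in friends if f < v)
--     if copies > 0:
--         ans += copies * presents[v - 1]
--     return ans
-- ===== Notes on version B (the rewrite author's own statement) =====
-- stated objective: alternative
-- what changed: A sorts friends descending and walks the sorted list element by element with a counter and a visited array; B never sorts: it finds the top-group size t (the largest k with at least k friends of value >= k) and the threshold value v of the t-th largest friend by binary search over counting passes, then sums presents by value classes (t cheapest presents, friends below v, leftover copies of v).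
import Mathlib
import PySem

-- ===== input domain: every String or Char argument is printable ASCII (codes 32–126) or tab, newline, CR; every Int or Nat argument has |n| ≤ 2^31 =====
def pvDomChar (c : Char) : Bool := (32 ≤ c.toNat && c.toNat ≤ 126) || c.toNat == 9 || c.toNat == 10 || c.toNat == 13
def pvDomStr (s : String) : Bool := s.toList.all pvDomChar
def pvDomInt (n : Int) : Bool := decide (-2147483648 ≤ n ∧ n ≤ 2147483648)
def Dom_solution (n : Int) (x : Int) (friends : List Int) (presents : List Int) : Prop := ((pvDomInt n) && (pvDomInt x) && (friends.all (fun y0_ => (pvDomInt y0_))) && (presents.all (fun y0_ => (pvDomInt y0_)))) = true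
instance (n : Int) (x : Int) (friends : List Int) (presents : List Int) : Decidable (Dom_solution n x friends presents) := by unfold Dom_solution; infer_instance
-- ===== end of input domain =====

-- B replaces A's sort + greedy scan by counting selection: the size t of the greedy "top"
-- group and its threshold value are found by binary search over counting passes, with no
-- sorting at all (objective: alternative). A sorts `friends` in place, B does not mutate it;
-- the theorems below are about the return value.

-- ===== PORT A =====
-- the for-loop of A; Option threads Python's IndexError (none = raise);
-- `visited.set cnt.toNat true` is exact: cnt ≥ 0 and in range whenever the preceding pyGet? succeeded
def solAGo (presents : List Int) : List Int → Int → Int → List Bool → Option Int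
  | [], ans, _, _ => some ans
  | f :: rest, ans, cnt, visited =>
    if cnt < f then
      match PySem.List.pyGet? visited cnt with
      | none => none
      | some v =>
        if v = false then
          match PySem.List.pyGet? presents cnt with
          | none => none
          | some p => solAGo presents rest (ans + p) (cnt + 1) (visited.set cnt.toNat true)
        else
          match PySem.List.pyGet? presents (f - 1) with
          | none => none
          | some p => solAGo presents rest (ans + p) cnt visited
    else
      match PySem.List.pyGet? presents (f - 1) with
      | none => none
      | some p => solAGo presents rest (ans + p) cnt visited

def solution (n : Int) (x : Int) (friends : List Int) (presents : List Int) : Int :=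
  (solAGo presents (PySem.List.sorted friends (fun y => y) true) 0 0
      (List.replicate n.toNat false)).getD 0

-- ===== PORT B =====
-- `sum(1 for f in friends if f >= w)`
def bCountGe (friends : List Int) (w : Int) : Int :=
  friends.foldl (fun acc f => if w ≤ f then acc + 1 else acc) 0

-- `while lo < hi: mid = (lo+hi+1)//2; if pred(mid): lo = mid else: hi = mid - 1` then `return lo`
def bSearch (pred : Int → Bool) (lo hi : Int) : Int :=
  if h : lo < hi then
    if pred (PySem.Int.floordiv (lo + hi + 1) 2) then
      bSearch pred (PySem.Int.floordiv (lo + hi + 1) 2) hi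
    else
      bSearch pred lo (PySem.Int.floordiv (lo + hi + 1) 2 - 1)
  else lo
termination_by (hi - lo).toNat
decreasing_by
  · have h2 := PySem.Int.floordiv_eq_ediv_of_pos (a := lo + hi + 1) (b := 2) (by omega)
    omega
  · have h2 := PySem.Int.floordiv_eq_ediv_of_pos (a := lo + hi + 1) (b := 2) (by omega)
    omega

-- `sum(presents[i] for i in range(t))`, fed the range list; none = IndexError
def bPrefSum (presents : List Int) : List Int → Option Int
  | [] => some 0
  | i :: rest =>
    match PySem.List.pyGet? presents i with
    | none => none
    | some p => (bPrefSum presents rest).map (fun m => p + m)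

-- `sum(presents[f - 1] for f in l)`; none = IndexError
def bSum2 (presents : List Int) : List Int → Option Int
  | [] => some 0
  | f :: rest =>
    match PySem.List.pyGet? presents (f - 1) with
    | none => none
    | some p => (bSum2 presents rest).map (fun m => p + m)

def solution_alt (n : Int) (x : Int) (friends : List Int) (presents : List Int) : Int :=
  let t := bSearch (fun k => decide (k ≤ bCountGe friends k)) 0 (friends.length : Int)
  match bPrefSum presents (PySem.List.pyRange 0 t 1) with
  | none => 0
  | some ans =>
    if t = 0 then
      match bSum2 presents friends with
      | none => 0
      | some m => ans + m
    else
      match PySem.List.max? friends (fun y => y) with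
      | none => 0      -- unreachable: t ≥ 1 forces friends ≠ []
      | some mx =>
        let v := bSearch (fun w => decide (t ≤ bCountGe friends w)) t mx
        let gt := friends.foldl (fun acc f => if v < f then acc + 1 else acc) (0 : Int)
        let copies := friends.foldl (fun acc f => if f = v then acc + 1 else acc) (0 : Int) - (t - gt)
        match bSum2 presents (friends.filter (fun f => decide (f < v))) with
        | none => 0
        | some m2 =>
          if 0 < copies then
            match PySem.List.pyGet? presents (v - 1) with
            | none => 0
            | some pv => ans + m2 + copies * pv
          else ans + m2

-- ===== PRECONDITION & SPEC =====
-- Pre_ = exactly the inputs where A raises no IndexError: with s the descending sort, at each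
-- position i the first branch fires iff s[i] > i, needing i < n (visited) and i < len(presents);
-- otherwise presents[s[i]-1] must be a valid (possibly negative) Python index.
def Pre_solution (n : Int) (x : Int) (friends : List Int) (presents : List Int) : Prop :=
  ∀ p ∈ (PySem.List.sorted friends (fun y => y) true).zipIdx,
    if (p.2 : Int) < p.1 then ((p.2 : Int) < n ∧ (p.2 : Int) < (presents.length : Int))
    else (-(presents.length : Int) ≤ p.1 - 1 ∧ p.1 - 1 < (presents.length : Int))
instance (n : Int) (x : Int) (friends : List Int) (presents : List Int) : Decidable (Pre_solution n x friends presents) := by unfold Pre_solution; infer_instance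

def pvWitness_solution : Int × Int × List Int × List Int := (2, 0, [2, 1], [5, 7])

def Spec_solution (n : Int) (x : Int) (friends : List Int) (presents : List Int) (out : Int) : Prop := out = solution_alt n x friends presents
instance (n : Int) (x : Int) (friends : List Int) (presents : List Int) (out : Int) : Decidable (Spec_solution n x friends presents out) := by unfold Spec_solution; infer_instance

-- ===== CLAIM (what is proved, stated in full; the proofs are below) =====
def Claim_equal_solution : Prop := ∀ (n : Int) (x : Int) (friends : List Int) (presents : List Int), Dom_solution n x friends presents → Pre_solution n x friends presents → Spec_solution n x friends presents (solution n x friends presents)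

-- ===== LEMMAS AND PROOFS =====

-- the number of leading positions taking A's first branch, counted from running counter c
def clCount : List Int → Int → Nat
  | [], _ => 0
  | f :: r, c => if c < f then clCount r (c + 1) + 1 else 0

theorem clCount_getElem (s : List Int) (c : Int) (i : Nat) (hi : i < clCount s c)
    (hl : i < s.length) : c + (i : Int) < s[i] := by
  induction s generalizing c i with
  | nil => simp at hl
  | cons f r ih =>
    by_cases h : c < f
    · cases i with
      | zero => simpa using h
      | succ j =>
        have hj : j < clCount r (c + 1) := by
          simp [clCount, h] at hi; omega
        have := ih (c + 1) j hj (by simpa using hl)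
        simpa [add_comm, add_assoc, add_left_comm] using by push_cast at this ⊢; omega
    · simp [clCount, h] at hi

theorem clCount_le_length (s : List Int) (c : Int) : clCount s c ≤ s.length := by
  induction s generalizing c with
  | nil => simp [clCount]
  | cons f r ih =>
    by_cases h : c < f
    · simp [clCount, h]; exact ih (c + 1)
    · simp [clCount, h]

theorem clCount_stop (s : List Int) (c : Int) (h : clCount s c < s.length) :
    s[clCount s c] ≤ c + (clCount s c : Int) := by
  induction s generalizing c with
  | nil => simp at h
  | cons f r ih =>
    by_cases hf : c < f
    · have h' : clCount r (c + 1) < r.length := by simp [clCount, hf] at h ⊢; omega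
      have := ih (c + 1) h'
      simp only [clCount, if_pos hf]
      push_cast
      simpa [add_comm, add_assoc, add_left_comm] using by push_cast at this; omega
    · simp [clCount, hf] at h ⊢; omega

-- phase 2 of A: once every remaining friend is ≤ cnt, A only takes the else branch
theorem go_else (presents : List Int) (s : List Int) (ans cnt : Int) (visited : List Bool)
    (hall : ∀ g ∈ s, g ≤ cnt) :
    solAGo presents s ans cnt visited = (bSum2 presents s).map (fun m => ans + m) := by
  induction s generalizing ans with
  | nil => simp [solAGo, bSum2]
  | cons f r ih =>
    have hf : ¬ cnt < f := not_lt.mpr (hall f (by simp))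
    simp only [solAGo, bSum2, if_neg hf]
    cases hp : PySem.List.pyGet? presents (f - 1) with
    | none => simp
    | some p =>
      simp only [ih (ans + p) (fun g hg => hall g (by simp [hg]))]
      cases bSum2 presents r <;> simp <;> ring

-- main invariant: A's loop from counter cnt over a descending list equals
-- (sum of presents[cnt..cnt+k)) + the tail sum over the dropped part, k = clCount s cnt
theorem go_eq (presents : List Int) (s : List Int) (ans cnt : Int) (visited : List Bool)
    (hs : s.Pairwise (fun a b => b ≤ a)) (hc : 0 ≤ cnt)
    (hinv : ∀ b ∈ visited.drop cnt.toNat, b = false)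
    (hv : cnt + (clCount s cnt : Nat) ≤ (visited.length : Int))
    (hp : cnt + (clCount s cnt : Nat) ≤ (presents.length : Int)) :
    solAGo presents s ans cnt visited =
      (bSum2 presents (s.drop (clCount s cnt))).map
        (fun m => ans + ((presents.drop cnt.toNat).take (clCount s cnt)).sum + m) := by
  induction s generalizing ans cnt visited with
  | nil => simp [solAGo, bSum2, clCount]
  | cons f r ih =>
    rcases List.pairwise_cons.mp hs with ⟨hhead, htail⟩
    by_cases h : cnt < f
    · have hcl : clCount (f :: r) cnt = clCount r (cnt + 1) + 1 := by simp [clCount, h]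
      rw [hcl] at hv hp
      have hcv : cnt < (visited.length : Int) := by push_cast at hv ⊢; omega
      have hcp : cnt < (presents.length : Int) := by push_cast at hp ⊢; omega
      have hcnl : cnt.toNat < visited.length := by omega
      have hgv : PySem.List.pyGet? visited cnt = some visited[cnt.toNat] := by
        rw [PySem.List.pyGet?_of_nonneg _ hc]
        exact List.getElem?_eq_getElem hcnl
      have hvf : visited[cnt.toNat] = false := by
        apply hinv
        rw [List.mem_drop_iff_getElem]
        exact ⟨0, by omega, by simp⟩
      have hcnp : cnt.toNat < presents.length := by omega
      have hgp : PySem.List.pyGet? presents cnt = some presents[cnt.toNat] := by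
        rw [PySem.List.pyGet?_of_nonneg _ hc]
        exact List.getElem?_eq_getElem hcnp
      have ht1 : (cnt + 1).toNat = cnt.toNat + 1 := by omega
      have hrec := ih (ans + presents[cnt.toNat]) (cnt + 1) (visited.set cnt.toNat true) htail
        (by omega)
        (by
          intro b hb
          apply hinv
          rw [ht1, List.drop_set_of_lt (by omega)] at hb
          have hdd : (List.drop cnt.toNat visited).drop 1 = List.drop (cnt.toNat + 1) visited := by
            rw [List.drop_drop]
          rw [← hdd] at hb
          exact List.mem_of_mem_drop hb)
        (by rw [List.length_set]; push_cast at hv ⊢; omega)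
        (by push_cast at hp ⊢; omega)
      have hpd : presents.drop cnt.toNat = presents[cnt.toNat] :: presents.drop (cnt.toNat + 1) :=
        List.drop_eq_getElem_cons (by omega)
      simp only [solAGo, if_pos h, hgv, hvf, if_true, hgp]
      rw [hrec, hcl, List.drop_succ_cons]
      cases bSum2 presents (r.drop (clCount r (cnt + 1))) with
      | none => simp
      | some m =>
        simp only [Option.map_some, Option.some.injEq]
        rw [ht1, hpd, List.take_succ_cons, List.sum_cons]
        ring
    · have hcl : clCount (f :: r) cnt = 0 := by simp [clCount, h]
      rw [hcl]
      rw [go_else presents (f :: r) ans cnt visited]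
      · simp
      · intro g hg
        rcases List.mem_cons.mp hg with rfl | hg'
        · omega
        · exact le_trans (hhead g hg') (not_lt.mp h)

-- B-side lemmas ------------------------------------------------------------

theorem bCountGe_eq (friends : List Int) (w : Int) :
    bCountGe friends w = (friends.countP (fun f => w ≤ f) : Int) := by
  simpa using PySem.List.foldl_ite_add_one (fun f => w ≤ f) friends 0

theorem bSearch_spec_aux (pred : Int → Bool) (k : Nat) :
    ∀ (lo hi r : Int), (hi - lo).toNat ≤ k → lo ≤ hi →
    (∀ a b : Int, a ≤ b → pred b = true → pred a = true) →
    lo ≤ r → r ≤ hi → pred r = true → (r = hi ∨ pred (r + 1) = false) →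
    bSearch pred lo hi = r := by
  induction k with
  | zero =>
    intro lo hi r hk hlohi hmono hr1 hr2 hpr hnr
    rw [bSearch, dif_neg (by omega)]
    omega
  | succ k ih =>
    intro lo hi r hk hlohi hmono hr1 hr2 hpr hnr
    by_cases hlt : lo < hi
    · have hmid := PySem.Int.floordiv_eq_ediv_of_pos (a := lo + hi + 1) (b := 2) (by omega)
      set mid := PySem.Int.floordiv (lo + hi + 1) 2 with hmiddef
      have hb1 : lo < mid := by omega
      have hb2 : mid ≤ hi := by omega
      rw [bSearch, dif_pos hlt]
      by_cases hp : pred mid = true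
      · rw [if_pos hp]
        have hmr : mid ≤ r := by
          by_contra hc
          rcases hnr with rfl | hf
          · omega
          · have := hmono (r + 1) mid (by omega) hp
            rw [this] at hf; simp at hf
        exact ih mid hi r (by omega) (by omega) hmono hmr hr2 hpr hnr
      · rw [if_neg hp]
        have hrm : r ≤ mid - 1 := by
          by_contra hc
          exact hp (hmono mid r (by omega) hpr)
        apply ih lo (mid - 1) r (by omega) (by omega) hmono hr1 hrm hpr
        rcases hnr with rfl | hf
        · omega
        · exact Or.inr hf
    · rw [bSearch, dif_neg hlt]
      omega

-- the binary search returns the unique lo-reachable maximiser of an antitone predicate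
theorem bSearch_spec (pred : Int → Bool) (lo hi r : Int)
    (hlohi : lo ≤ hi)
    (hmono : ∀ a b : Int, a ≤ b → pred b = true → pred a = true)
    (hr1 : lo ≤ r) (hr2 : r ≤ hi) (hpr : pred r = true)
    (hnr : r = hi ∨ pred (r + 1) = false) :
    bSearch pred lo hi = r := by
  exact bSearch_spec_aux pred (hi - lo).toNat lo hi r le_rfl hlohi hmono hr1 hr2 hpr hnr

-- counting in a descending list: a prefix all ≥ w gives a lower bound …
theorem desc_countP_ge (s : List Int) (w : Int) (j : Nat)
    (hj : j ≤ s.length) (h : ∀ i : Nat, (hi : i < j) → w ≤ s[i]'(lt_of_lt_of_le hi hj)) :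
    j ≤ s.countP (fun f => w ≤ f) := by
  have hsplit : s.countP (fun f => w ≤ f)
      = (s.take j).countP (fun f => w ≤ f) + (s.drop j).countP (fun f => w ≤ f) := by
    rw [← List.countP_append, List.take_append_drop]
  have htake : (s.take j).countP (fun f => w ≤ f) = (s.take j).length := by
    rw [List.countP_eq_length]
    intro a ha
    obtain ⟨i, hi, rfl⟩ := List.mem_iff_getElem.mp ha
    rw [List.getElem_take]
    simp only [decide_eq_true_eq]
    exact h i (by simp at hi; omega)
  have hlen : (s.take j).length = j := by simp; omega
  omega

-- … and one element < w caps it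
theorem desc_countP_lt (s : List Int) (hs : s.Pairwise (fun a b => b ≤ a)) (w : Int) (j : Nat)
    (hj : j < s.length) (h : s[j] < w) :
    s.countP (fun f => w ≤ f) ≤ j := by
  have hsplit : s.countP (fun f => w ≤ f)
      = (s.take j).countP (fun f => w ≤ f) + (s.drop j).countP (fun f => w ≤ f) := by
    rw [← List.countP_append, List.take_append_drop]
  have hdrop : (s.drop j).countP (fun f => w ≤ f) = 0 := by
    rw [List.countP_eq_zero]
    intro a ha
    obtain ⟨i, hi, rfl⟩ := List.mem_iff_getElem.mp ha
    rw [List.getElem_drop]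
    have hpg := List.pairwise_iff_getElem.mp hs
    simp only [decide_eq_true_eq, not_le]
    rcases Nat.eq_zero_or_pos i with rfl | hpos
    · simpa using h
    · have := hpg j (j + i) hj (by simp at hi; omega) (by omega)
      omega
  have := List.countP_le_length (l := s.take j) (p := fun f => w ≤ f)
  simp at this
  omega

-- a valid-index sum evaluates to the plain sum of the looked-up values
theorem bSum2_eq_some (presents : List Int) (l : List Int)
    (hall : ∀ f ∈ l, PySem.Raise.InRange presents.length (f - 1)) :
    bSum2 presents l =
      some ((l.map (fun f => (PySem.List.pyGet? presents (f - 1)).getD 0)).sum) := by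
  induction l with
  | nil => simp [bSum2]
  | cons f r ih =>
    have hf : (PySem.List.pyGet? presents (f - 1)).isSome := by
      rw [Option.isSome_iff_ne_none]
      intro hc
      rw [PySem.List.pyGet?_eq_none_iff] at hc
      exact hc (hall f (by simp))
    obtain ⟨p, hp⟩ := Option.isSome_iff_exists.mp hf
    simp only [bSum2, hp, ih (fun g hg => hall g (by simp [hg])), Option.map_some, List.map_cons,
      List.sum_cons, Option.getD_some]

theorem bPrefSum_range_aux (presents : List Int) (a k : Nat) (hk : a + k ≤ presents.length) :
    bPrefSum presents (PySem.List.pyRange (a : Int) ((a : Int) + (k : Int)) 1)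
      = some (((presents.drop a).take k).sum) := by
  induction k generalizing a with
  | zero => simp [PySem.List.pyRange_one_eq_nil, bPrefSum]
  | succ k ih =>
    rw [PySem.List.pyRange_one_cons (by omega)]
    have hgp : PySem.List.pyGet? presents (a : Int) = some (presents[a]'(by omega)) := by
      rw [PySem.List.pyGet?_of_nonneg _ (by positivity)]
      simp only [Int.toNat_natCast]
      exact List.getElem?_eq_getElem (by omega)
    have harg : (a : Int) + 1 = ((a + 1 : Nat) : Int) := by push_cast; ring
    have harg2 : (a : Int) + ((k + 1 : Nat) : Int) = ((a + 1 : Nat) : Int) + (k : Nat) := by push_cast; ring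
    simp only [bPrefSum, hgp, harg2, harg, ih (a + 1) (by omega)]
    rw [List.drop_eq_getElem_cons (by omega : a < presents.length), List.take_succ_cons, List.sum_cons]
    simp

theorem bPrefSum_range (presents : List Int) (k : Nat) (hk : k ≤ presents.length) :
    bPrefSum presents (PySem.List.pyRange 0 (k : Int) 1) = some ((presents.take k).sum) := by
  simpa using bPrefSum_range_aux presents 0 k (by omega)

-- bounds from Pre_ on the prefix length c
theorem pre_c_bounds (n x : Int) (friends presents : List Int)
    (hpre : Pre_solution n x friends presents) :
    ((clCount (PySem.List.sorted friends (fun y => y) true) 0 : Int) ≤ (n.toNat : Int)) ∧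
    ((clCount (PySem.List.sorted friends (fun y => y) true) 0 : Int) ≤ (presents.length : Int)) := by
  set s := PySem.List.sorted friends (fun y => y) true with hsdef
  set c := clCount s 0 with hcdef
  have hcle : c ≤ s.length := clCount_le_length s 0
  rcases Nat.eq_zero_or_pos c with h0 | hpos
  · rw [h0]; constructor <;> (push_cast; omega)
  · have hlen : c - 1 < s.length := by omega
    have hget : ((c : Int) - 1) < s[c-1] := by
      have := clCount_getElem s 0 (c - 1) (by omega) hlen
      push_cast at this ⊢; omega
    have hmem : (s[c-1], c - 1) ∈ s.zipIdx := by
      rw [List.mem_zipIdx_iff_getElem?]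
      exact List.getElem?_eq_getElem hlen
    have hthis := hpre _ hmem
    simp only at hthis
    rw [if_pos (by push_cast; omega)] at hthis
    push_cast at hthis ⊢
    omega

-- every element of the dropped tail is a valid (possibly negative) index into presents
theorem pre_dropvalid (n x : Int) (friends presents : List Int)
    (hpre : Pre_solution n x friends presents) :
    ∀ f ∈ (PySem.List.sorted friends (fun y => y) true).drop
        (clCount (PySem.List.sorted friends (fun y => y) true) 0),
      PySem.Raise.InRange presents.length (f - 1) := by
  set s := PySem.List.sorted friends (fun y => y) true with hsdef
  set c := clCount s 0 with hcdef
  have hs : s.Pairwise (fun a b => b ≤ a) := PySem.List.sorted_pairwise_rev friends (fun y => y)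
  have hcle : c ≤ s.length := clCount_le_length s 0
  intro f hf
  obtain ⟨i, hi, rfl⟩ := List.mem_iff_getElem.mp hf
  rw [List.getElem_drop]
  have hci : c + i < s.length := by simp at hi; omega
  have hmem : (s[c+i], c + i) ∈ s.zipIdx := by
    rw [List.mem_zipIdx_iff_getElem?]
    exact List.getElem?_eq_getElem hci
  have hsmall : s[c+i] ≤ ((c : Int) + i) := by
    have hstop : s[c]'(by omega) ≤ 0 + (c : Int) := clCount_stop s 0 (by omega)
    have hmono : s[c+i] ≤ s[c]'(by omega) := by
      rcases Nat.eq_zero_or_pos i with rfl | hpos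
      · simp
      · exact (List.pairwise_iff_getElem.mp hs) c (c+i) (by omega) hci (by omega)
    push_cast at hstop ⊢
    omega
  have hthis := hpre _ hmem
  simp only at hthis
  rw [if_neg (by push_cast; omega)] at hthis
  exact hthis

-- A's loop value, split at c = clCount s 0
theorem a_value (n x : Int) (friends presents : List Int)
    (hpre : Pre_solution n x friends presents) :
    solution n x friends presents =
      (presents.take (clCount (PySem.List.sorted friends (fun y => y) true) 0)).sum +
      (((PySem.List.sorted friends (fun y => y) true).drop
          (clCount (PySem.List.sorted friends (fun y => y) true) 0)).map
        (fun f => (PySem.List.pyGet? presents (f - 1)).getD 0)).sum := by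
  have hbounds := pre_c_bounds n x friends presents hpre
  have hdropvalid := pre_dropvalid n x friends presents hpre
  set s := PySem.List.sorted friends (fun y => y) true with hsdef
  set c := clCount s 0 with hcdef
  have hs : s.Pairwise (fun a b => b ≤ a) := PySem.List.sorted_pairwise_rev friends (fun y => y)
  have hmain := go_eq presents s 0 0 (List.replicate n.toNat false) hs le_rfl
    (by intro b hb; exact List.eq_of_mem_replicate (List.mem_of_mem_drop hb))
    (by rw [List.length_replicate]; omega)
    (by omega)
  rw [bSum2_eq_some presents _ hdropvalid] at hmain
  unfold solution
  rw [← hsdef, hmain]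
  rw [← hcdef]
  simp

theorem bCountGe_antitone (friends : List Int) (a b : Int) (h : a ≤ b) :
    bCountGe friends b ≤ bCountGe friends a := by
  simp only [bCountGe_eq]
  exact_mod_cast List.countP_mono_left (fun f _ hf => by simp only [decide_eq_true_eq] at hf ⊢; omega)

-- the dropped tail, as a multiset, is (friends below v) plus the leftover copies of v
theorem drop_perm_split (s friends : List Int) (c : Nat) (v : Int)
    (hperm : s.Perm friends) (hcle : c ≤ s.length)
    (htake_ge : ∀ a ∈ s.take c, v ≤ a) (hdrop_le : ∀ a ∈ s.drop c, a ≤ v) :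
    friends.countP (fun f => decide (v < f)) ≤ c ∧
    c - friends.countP (fun f => decide (v < f)) ≤ friends.count v ∧
    (s.drop c).Perm (friends.filter (fun f => decide (f < v)) ++
      List.replicate (friends.count v - (c - friends.countP (fun f => decide (v < f)))) v) := by
  set tk := s.take c with htk
  set dp := s.drop c with hdp
  have hsplit : tk ++ dp = s := List.take_append_drop c s
  have hlentk : tk.length = c := by simp [htk]; omega
  have hdp0 : dp.countP (fun f => decide (v < f)) = 0 := by
    rw [List.countP_eq_zero]
    intro a ha
    simpa using not_lt.mpr (hdrop_le a ha)
  have hgt_eq : friends.countP (fun f => decide (v < f)) = tk.countP (fun f => decide (v < f)) := by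
    rw [← hperm.countP_eq, ← hsplit, List.countP_append, hdp0]
    omega
  have hcv_take : tk.countP (fun f => decide (v < f)) + tk.count v = c := by
    have h1 := List.length_eq_countP_add_countP (fun f => decide (v < f)) (l := tk)
    have h2 : tk.countP (fun a => decide ¬(decide (v < a)) = true) = tk.count v := by
      rw [List.count_eq_countP]
      apply List.countP_congr
      intro a ha
      have := htake_ge a ha
      simp only [decide_eq_true_eq, decide_not]
      constructor
      · intro hh
        simp at hh ⊢
        omega
      · intro hh
        simp at hh ⊢
        omega
    omega
  have hgtle : friends.countP (fun f => decide (v < f)) ≤ c := by omega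
  have hcount_s : friends.count v = tk.count v + dp.count v := by
    rw [← hperm.count_eq, ← hsplit, List.count_append]
  have hcvle : c - friends.countP (fun f => decide (v < f)) ≤ friends.count v := by omega
  refine ⟨hgtle, hcvle, ?_⟩
  rw [List.perm_iff_count]
  intro y
  have hcount_y : friends.count y = tk.count y + dp.count y := by
    rw [← hperm.count_eq, ← hsplit, List.count_append]
  rcases lt_trichotomy y v with hy | hy | hy
  · have htk0 : tk.count y = 0 := by
      rw [List.count_eq_zero]
      intro hmem
      exact absurd (htake_ge y hmem) (by omega)
    rw [List.count_append, List.count_filter (by simpa using hy), List.count_replicate,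
      if_neg (by simp; omega)]
    omega
  · rw [hy] at hcount_y ⊢
    have hrepl : (List.replicate (friends.count v - (c - friends.countP (fun f => decide (v < f)))) v).count v
        = friends.count v - (c - friends.countP (fun f => decide (v < f))) := by
      rw [List.count_replicate, if_pos (by simp)]
    have hfil0 : (friends.filter (fun f => decide (f < v))).count v = 0 := by
      rw [List.count_eq_zero]
      intro hmem
      have := List.of_mem_filter hmem
      simp at this
    rw [List.count_append, hfil0, hrepl]
    omega
  · have hdp0' : dp.count y = 0 := by
      rw [List.count_eq_zero]
      intro hmem
      exact absurd (hdrop_le y hmem) (by omega)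
    have hfil0 : (friends.filter (fun f => decide (f < v))).count y = 0 := by
      rw [List.count_eq_zero]
      intro hmem
      have := List.of_mem_filter hmem
      simp at this
      omega
    rw [List.count_append, hfil0, List.count_replicate, if_neg (by simp; omega)]
    omega

theorem solution_spec : Claim_equal_solution := by
  intro n x friends presents _hdom hpre
  unfold Spec_solution
  rw [a_value n x friends presents hpre]
  unfold solution_alt
  have hbounds := pre_c_bounds n x friends presents hpre
  have hdropvalid := pre_dropvalid n x friends presents hpre
  set s := PySem.List.sorted friends (fun y => y) true with hsdef
  set c := clCount s 0 with hcdef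
  have hs : s.Pairwise (fun a b => b ≤ a) := PySem.List.sorted_pairwise_rev friends (fun y => y)
  have hperm : s.Perm friends := PySem.List.sorted_perm friends (fun y => y) true
  have hlen : s.length = friends.length := PySem.List.length_sorted friends (fun y => y) true
  have hcle : c ≤ s.length := clCount_le_length s 0
  have hmono := List.pairwise_iff_getElem.mp hs
  -- every prefix element is ≥ s[c-1] ≥ c
  have hlast : ∀ (hpos : 0 < c), ((c : Int) - 1) < s[c-1]'(by omega) := by
    intro hpos
    have := clCount_getElem s 0 (c-1) (by omega) (by omega)
    push_cast at this ⊢; omega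
  have hseg : ∀ (hpos : 0 < c) (i : Nat), (hi : i < c) → s[c-1]'(by omega) ≤ s[i]'(lt_of_lt_of_le hi hcle) := by
    intro hpos i hi
    by_cases hic : i = c - 1
    · subst hic; exact le_refl _
    · exact hmono i (c-1) (by omega) (by omega) (by omega)
  have hprefgood : ∀ i : Nat, (hi : i < c) → (c : Int) ≤ s[i]'(lt_of_lt_of_le hi hcle) := by
    intro i hi
    have h1 := hlast (by omega)
    have h2 := hseg (by omega) i hi
    omega
  -- the first binary search computes c
  have ht : bSearch (fun k => decide (k ≤ bCountGe friends k)) 0 (friends.length : Int) = (c : Int) := by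
    apply bSearch_spec
    · positivity
    · intro a b hab hb
      simp only [decide_eq_true_eq] at hb ⊢
      have := bCountGe_antitone friends a b hab
      omega
    · positivity
    · push_cast; omega
    · simp only [decide_eq_true_eq, bCountGe_eq, ← hperm.countP_eq]
      have := desc_countP_ge s (c : Int) c hcle hprefgood
      push_cast; omega
    · by_cases hceq : c = s.length
      · left; push_cast; omega
      · right
        have hlt : c < s.length := by omega
        have hstop : s[c]'hlt ≤ 0 + (c : Int) := clCount_stop s 0 hlt
        have hcap := desc_countP_lt s hs ((c : Int) + 1) c hlt (by omega)
        simp only [decide_eq_false_iff_not, bCountGe_eq, ← hperm.countP_eq, not_le]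
        push_cast; omega
  simp only [ht]
  rw [bPrefSum_range presents c (by omega)]
  simp only []
  by_cases hc0 : c = 0
  · -- t = 0: B sums presents[f-1] over the unsorted friends
    have hvalid : ∀ f ∈ friends, PySem.Raise.InRange presents.length (f - 1) := by
      intro f hf
      apply hdropvalid
      rw [hc0, List.drop_zero]
      exact hperm.mem_iff.mpr hf
    rw [bSum2_eq_some presents friends hvalid]
    simp only [hc0, Nat.cast_zero, reduceIte]
    have hsum : (s.map (fun f => (PySem.List.pyGet? presents (f - 1)).getD 0)).sum
        = (friends.map (fun f => (PySem.List.pyGet? presents (f - 1)).getD 0)).sum :=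
      (hperm.map (fun f => (PySem.List.pyGet? presents (f - 1)).getD 0)).sum_eq
    simp only [List.take_zero, List.sum_nil, zero_add, List.drop_zero]
    exact hsum
  · -- t = c ≥ 1
    have hpos : 0 < c := Nat.pos_of_ne_zero hc0
    rw [if_neg (show ¬ ((c : Int) = 0) by push_cast; omega)]
    have hne : friends ≠ [] := List.ne_nil_of_length_pos (by omega)
    rcases hq : PySem.List.max? friends (fun y => y) with _ | mx
    · exact absurd ((PySem.List.max?_eq_none_iff friends (fun y => y)).mp hq) hne
    simp only [hq]
    set v := s[c-1]'(by omega) with hvdef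
    have hvmem : v ∈ friends := hperm.mem_iff.mp (List.getElem_mem _)
    have hvmx : v ≤ mx := PySem.List.max?_isMax hq v hvmem
    have hcv : (c : Int) ≤ v := hprefgood (c-1) (by omega)
    -- the second binary search computes v = s[c-1]
    have hv2 : bSearch (fun w => decide ((c : Int) ≤ bCountGe friends w)) (c : Int) mx = v := by
      apply bSearch_spec
      · omega
      · intro a b hab hb
        simp only [decide_eq_true_eq] at hb ⊢
        have := bCountGe_antitone friends a b hab
        omega
      · omega
      · omega
      · simp only [decide_eq_true_eq, bCountGe_eq, ← hperm.countP_eq]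
        have := desc_countP_ge s v c hcle (fun i hi => hseg hpos i hi)
        push_cast; omega
      · right
        have hcap := desc_countP_lt s hs (v + 1) (c-1) (by omega) (by omega)
        simp only [decide_eq_false_iff_not, bCountGe_eq, ← hperm.countP_eq, not_le]
        push_cast; omega
    simp only [hv2]
    -- counting folds
    rw [PySem.List.foldl_ite_add_one (fun f => v < f) friends 0,
      PySem.List.foldl_ite_add_one (fun f => f = v) friends 0]
    have hcnt : friends.countP (fun f => decide (f = v)) = friends.count v := by
      rw [List.count_eq_countP]
      rfl
    rw [hcnt]
    -- multiset split of the tail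
    have htake_ge : ∀ a ∈ s.take c, v ≤ a := by
      intro a ha
      obtain ⟨i, hi, rfl⟩ := List.mem_iff_getElem.mp ha
      rw [List.getElem_take]
      exact hseg hpos i (by simp at hi; omega)
    have hdrop_le : ∀ a ∈ s.drop c, a ≤ v := by
      intro a ha
      obtain ⟨i, hi, rfl⟩ := List.mem_iff_getElem.mp ha
      rw [List.getElem_drop]
      exact hmono (c-1) (c+i) (by omega) (by simp at hi; omega) (by omega)
    obtain ⟨hgtle, hcvle, hperm2⟩ := drop_perm_split s friends c v hperm hcle htake_ge hdrop_le
    set gtN := friends.countP (fun f => decide (v < f)) with hgtdef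
    set cvN := friends.count v with hcvdef
    set copiesN := cvN - (c - gtN) with hcopdef
    -- B's filtered sum is defined
    have hfilvalid : ∀ f ∈ friends.filter (fun f => decide (f < v)), PySem.Raise.InRange presents.length (f - 1) := by
      intro f hf
      have hmemf := List.of_mem_filter hf
      simp only [decide_eq_true_eq] at hmemf
      have hmemf2 : f ∈ friends := List.mem_of_mem_filter hf
      apply hdropvalid
      have hins : f ∈ s := hperm.mem_iff.mpr hmemf2
      rw [← List.take_append_drop c s, List.mem_append] at hins
      rcases hins with hins | hins
      · exact absurd (htake_ge f hins) (by omega)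
      · exact hins
    rw [bSum2_eq_some presents _ hfilvalid]
    simp only []
    -- the tail sum splits along the permutation
    have hsum : ((s.drop c).map (fun f => (PySem.List.pyGet? presents (f - 1)).getD 0)).sum
        = ((friends.filter (fun f => decide (f < v))).map (fun f => (PySem.List.pyGet? presents (f - 1)).getD 0)).sum
          + (copiesN : Int) * (PySem.List.pyGet? presents (v - 1)).getD 0 := by
      rw [(hperm2.map _).sum_eq, List.map_append, List.sum_append, List.map_replicate,
        List.sum_replicate_int]
    have hcop_cast : 0 + (cvN : Int) - ((c : Int) - (0 + (gtN : Int))) = (copiesN : Int) := by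
      push_cast; omega
    rw [hcop_cast]
    by_cases hcop : 0 < copiesN
    · rw [if_pos (by exact_mod_cast hcop)]
      have hvdrop : v ∈ s.drop c := by
        rw [← List.count_pos_iff, hperm2.count_eq, List.count_append, List.count_replicate,
          if_pos (by simp)]
        omega
      have hvv := hdropvalid v hvdrop
      have hvsome : (PySem.List.pyGet? presents (v - 1)).isSome := by
        rw [Option.isSome_iff_ne_none]
        intro hcnone
        rw [PySem.List.pyGet?_eq_none_iff] at hcnone
        exact hcnone hvv
      obtain ⟨pv, hpv⟩ := Option.isSome_iff_exists.mp hvsome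
      rw [hpv]
      simp only []
      rw [hpv] at hsum
      simp only [Option.getD_some] at hsum
      rw [hsum]
      ring
    · rw [if_neg (by push_cast; omega)]
      have hcz : copiesN = 0 := by omega
      rw [hsum, hcz]
      simp
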